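-- pv_equiv track=rewrite | github.com/lammpstutorials/lammpstutorials.github.io | ebook/utilities.py | is_the_block_main
-- ===== SOURCE A (Python) =====
-- def is_the_block_main(file_content, position):
--     main_block = False
--     first_line = file_content[position]
--     cpt = 0
--     while first_line[0] == ' ':
--         cpt += 1
--         first_line = first_line[1:]
--     if cpt == 0:
--         main_block = True
--     return main_block
-- ===== SOURCE B (Python) =====
-- def is_the_block_main(file_content, position):
--     # Direct test: the line is a main block iff its first character is not a space.
--     # Explicit [0] indexing keeps the IndexError on an empty line, like A.
--     return file_content[position][0] != ' '
-- ===== Notes on version B (the rewrite author's own statement) =====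
-- stated objective: simpler
-- what changed: Replaces A's while-loop that counts and strips leading spaces with a single direct test of the line's first character against ' '.
import Mathlib
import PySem

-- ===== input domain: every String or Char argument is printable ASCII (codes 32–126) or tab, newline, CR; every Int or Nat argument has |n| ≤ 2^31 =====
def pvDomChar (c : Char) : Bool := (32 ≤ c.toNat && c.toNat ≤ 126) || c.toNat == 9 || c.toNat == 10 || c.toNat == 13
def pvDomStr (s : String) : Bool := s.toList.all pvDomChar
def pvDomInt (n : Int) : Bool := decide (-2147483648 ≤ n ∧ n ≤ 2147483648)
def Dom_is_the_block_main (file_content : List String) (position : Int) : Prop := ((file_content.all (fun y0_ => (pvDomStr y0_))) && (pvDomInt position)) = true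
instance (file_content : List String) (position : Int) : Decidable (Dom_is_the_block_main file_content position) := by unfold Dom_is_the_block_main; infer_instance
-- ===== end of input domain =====

-- B replaces A's strip-and-count loop with a single first-character test (simpler; return value only).


-- ===== PORT A =====
-- the while loop: strips leading spaces counting them; none = IndexError (line exhausted)
def pvStripLoop : List Char → Option Nat
  | [] => none
  | c :: rest => if c = ' ' then (pvStripLoop rest).map (· + 1) else some 0

def is_the_block_main (file_content : List String) (position : Int) : Bool :=
  match PySem.List.pyGet? file_content position with
  | none => false  -- IndexError (excluded by Pre_)
  | some first_line =>
    match pvStripLoop first_line.toList with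
    | none => false  -- IndexError (excluded by Pre_)
    | some cpt => decide (cpt = 0)

-- ===== PORT B =====
def is_the_block_main_alt (file_content : List String) (position : Int) : Bool :=
  match PySem.List.pyGet? file_content position with
  | none => false  -- IndexError (excluded by Pre_)
  | some line =>
    match PySem.Str.pyGet? line 0 with
    | none => false  -- IndexError (excluded by Pre_)
    | some c => decide (c ≠ ' ')

-- ===== PRECONDITION & SPEC =====
-- Pre_ excludes exactly the inputs where A raises IndexError: position out of range,
-- or the selected line has no non-space character (empty or all spaces).
def Pre_is_the_block_main (file_content : List String) (position : Int) : Prop :=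
  PySem.Raise.InRange file_content.length position ∧
  (PySem.List.pyGet? file_content position).any (fun line => line.toList.any (fun c => c ≠ ' ')) = true
instance (file_content : List String) (position : Int) : Decidable (Pre_is_the_block_main file_content position) := by unfold Pre_is_the_block_main; infer_instance

def pvWitness_is_the_block_main : List String × Int := (["def f():", "    pass"], 0)

def Spec_is_the_block_main (file_content : List String) (position : Int) (out : Bool) : Prop := out = is_the_block_main_alt file_content position
instance (file_content : List String) (position : Int) (out : Bool) : Decidable (Spec_is_the_block_main file_content position out) := by unfold Spec_is_the_block_main; infer_instance

-- ===== CLAIM (what is proved, stated in full; the proofs are below) =====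
def Claim_equal_is_the_block_main : Prop := ∀ (file_content : List String) (position : Int), Dom_is_the_block_main file_content position → Pre_is_the_block_main file_content position → Spec_is_the_block_main file_content position (is_the_block_main file_content position)


-- ===== LEMMAS AND PROOFS =====
-- If the line contains a non-space char, the strip loop terminates with count k,
-- and k = 0 iff the first char is not a space.
theorem pvStripLoop_eval (l : List Char) (h : ∃ c ∈ l, c ≠ ' ') :
    ∃ k, pvStripLoop l = some k ∧ ((k = 0) ↔ l.head? ≠ some ' ') := by
  induction l with
  | nil => simp at h
  | cons c rest ih =>
    by_cases hc : c = ' '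
    · subst hc
      have hrest : ∃ c ∈ rest, c ≠ ' ' := by
        obtain ⟨d, hd, hne⟩ := h
        rcases List.mem_cons.mp hd with h1 | h2
        · exact absurd h1 hne
        · exact ⟨d, h2, hne⟩
      obtain ⟨k, hk, _⟩ := ih hrest
      exact ⟨k + 1, by simp [pvStripLoop, hk], by simp⟩
    · exact ⟨0, by simp [pvStripLoop, hc], by simp [hc]⟩

-- ===== VERDICT (by name: the statement is the Claim_ definition above) =====
theorem is_the_block_main_spec : Claim_equal_is_the_block_main := by
  intro fc pos _hdom ⟨hin, hline⟩
  unfold Spec_is_the_block_main is_the_block_main is_the_block_main_alt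
  cases hg : PySem.List.pyGet? fc pos with
  | none => simp [PySem.List.pyGet?_eq_none_iff] at hg; exact absurd hin hg
  | some line =>
    rw [hg] at hline
    have hne : ∃ c ∈ line.toList, c ≠ ' ' := by
      simpa [List.any_eq_true] using hline
    obtain ⟨k, hk, hiff⟩ := pvStripLoop_eval line.toList hne
    have hnil : line.toList ≠ [] := by rintro h; rw [h] at hne; simp at hne
    cases hl : line.toList with
    | nil => exact absurd hl hnil
    | cons c rest =>
      dsimp only
      rw [hk]
      have hhead : line.toList.head? = some c := by rw [hl]; rfl
      have : PySem.Str.pyGet? line 0 = some c := by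
        simp only [PySem.Str.pyGet?]
        rw [hl]
        simp [PySem.Chars.pyGet?_eq_listPyGet?]
      rw [this]
      simp only [hhead] at hiff
      by_cases hc : c = ' '
      · subst hc
        simp at hiff ⊢
        omega
      · simp [hc]
        exact hiff.mpr (by simp [hc])
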